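-- pv_equiv track=rewrite | github.com/jebin2/solvechessdotcom | solvechessdotcom/stockfish.py | convert_to_algebraic_notation
-- ===== SOURCE A (Python) =====
-- def convert_to_algebraic_notation(board_visual):
--     white = []
--     black = []
--     rows = board_visual.strip().split('\n')[1:-1]  # Skip the top and bottom borders
--
--     for rank_index, row in enumerate(rows):
--         # Get the pieces from each row and their positions
--         cell = 0
--         for file_index, char in enumerate(row):
--             if char.isalpha():  # Check if the character is a piece
--                 file = chr(ord('a') + cell-1)  # Convert index to file (a-h)
--                 if ord(char) < ord('a'):
--                     white.append(f"{char}{file}{int(row[-1])}")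
--                 else:
--                     black.append(f"{char}{file}{int(row[-1])}")
--             if char == '|':
--                 cell += 1
--
--     return {
--         "white_position": white,
--         "black_position": black
--     }
-- ===== SOURCE B (Python) =====
-- def convert_to_algebraic_notation(board_visual):
--     white = []
--     black = []
--     rows = board_visual.strip().split('\n')[1:-1]  # Skip the top and bottom borders
--     for row in rows:
--         # Split the row into cell segments; the segment index is the cell number
--         for seg_index, segment in enumerate(row.split('|')):
--             for char in segment:
--                 if char.isalpha():
--                     square = f"{char}{chr(ord('a') + seg_index - 1)}{int(row[-1])}"
--                     if ord(char) < ord('a'):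
--                         white.append(square)
--                     else:
--                         black.append(square)
--     return {
--         "white_position": white,
--         "black_position": black
--     }
-- ===== Notes on version B (the rewrite author's own statement) =====
-- stated objective: alternative
-- what changed: Replaces A's running cell counter inside a single character scan by splitting each row into cell segments and using the enumerated segment index as the cell number.
import Mathlib
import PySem

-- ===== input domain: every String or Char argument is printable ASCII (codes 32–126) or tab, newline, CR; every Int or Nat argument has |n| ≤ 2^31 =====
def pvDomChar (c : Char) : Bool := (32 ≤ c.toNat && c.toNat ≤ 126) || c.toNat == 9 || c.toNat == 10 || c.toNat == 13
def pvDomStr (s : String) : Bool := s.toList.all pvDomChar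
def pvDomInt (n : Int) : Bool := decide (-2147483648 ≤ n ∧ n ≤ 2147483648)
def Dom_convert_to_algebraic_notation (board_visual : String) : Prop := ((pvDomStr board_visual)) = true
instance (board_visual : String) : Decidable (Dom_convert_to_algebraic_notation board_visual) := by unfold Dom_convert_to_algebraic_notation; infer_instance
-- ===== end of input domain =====

-- B replaces A's running '|' cell counter by splitting each row on '|' and using the
-- segment index as the cell number (objective: alternative decomposition, same cost).

-- Shared helper: the same Python line in A and B — board_visual.strip().split('\n')[1:-1]
def pvRows (board_visual : String) : List (List Char) :=
  PySem.List.slice (PySem.Chars.splitOn (PySem.Chars.strip board_visual.toList) ['\n'])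
    (some 1) (some (-1))

-- Shared helper: the same Python expression in A and B — int(row[-1])
-- (Pre_ guarantees the option is some whenever this value is used)
def pvRank (row : List Char) : Int :=
  match PySem.List.pyGet? row (-1) with
  | some c => (PySem.Int.ofChars? [c]).getD 0
  | none => 0

-- Shared helper: f"{char}{file}{rank}"
def pvSq (ch file : Char) (rank : Int) : String :=
  String.ofList ([ch, file] ++ PySem.Int.toChars rank)

-- ===== PORT A =====
-- body of A's inner loop: state (white, black, cell)
def pvAStep (row : List Char) (st : List String × List String × Int) (ch : Char) :
    List String × List String × Int :=
  let st1 :=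
    if PySem.Chars.isalpha ch then
      let file := Char.ofNat (97 + st.2.2 - 1).toNat
      let sq := pvSq ch file (pvRank row)
      if ch.toNat < 97 then (st.1 ++ [sq], st.2.1, st.2.2)
      else (st.1, st.2.1 ++ [sq], st.2.2)
    else st
  if ch = '|' then (st1.1, st1.2.1, st1.2.2 + 1) else st1

def convert_to_algebraic_notation (board_visual : String) : List (String × List String) :=
  let rows := pvRows board_visual
  let res := rows.foldl (fun (wb : List String × List String) row =>
      let st := row.foldl (pvAStep row) (wb.1, wb.2, (0 : Int))
      (st.1, st.2.1)) ([], [])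
  [("white_position", res.1), ("black_position", res.2)]

-- ===== PORT B =====
-- body of B's innermost loop: the cell number i comes from enumerate(row.split('|'))
def pvBChar (row : List Char) (i : Nat) (wb : List String × List String) (ch : Char) :
    List String × List String :=
  if PySem.Chars.isalpha ch then
    let sq := pvSq ch (Char.ofNat (96 + i)) (pvRank row)
    if ch.toNat < 97 then (wb.1 ++ [sq], wb.2) else (wb.1, wb.2 ++ [sq])
  else wb

def pvBSeg (row : List Char) (wb : List String × List String) (p : List Char × Nat) :
    List String × List String :=
  p.1.foldl (pvBChar row p.2) wb

def convert_to_algebraic_notation_alt (board_visual : String) : List (String × List String) :=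
  let rows := pvRows board_visual
  let res := rows.foldl (fun (wb : List String × List String) row =>
      ((PySem.Chars.splitOn row ['|']).zipIdx).foldl (pvBSeg row) wb) ([], [])
  [("white_position", res.1), ("black_position", res.2)]

-- ===== PRECONDITION & SPEC =====
-- Pre_ excludes exactly the inputs on which Python A raises: a kept row that contains a
-- letter but whose last character is not parseable by int() (ValueError there).
def Pre_convert_to_algebraic_notation (board_visual : String) : Prop :=
  ((pvRows board_visual).all (fun row =>
    !row.any PySem.Chars.isalpha ||
      (match PySem.List.pyGet? row (-1) with
       | some c => (PySem.Int.ofChars? [c]).isSome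
       | none => false))) = true

instance (board_visual : String) : Decidable (Pre_convert_to_algebraic_notation board_visual) := by
  unfold Pre_convert_to_algebraic_notation; infer_instance

def pvWitness_convert_to_algebraic_notation : String := "+--+\n| K | 1\n+--+"

def Spec_convert_to_algebraic_notation (board_visual : String) (out : List (String × List String)) : Prop := out = convert_to_algebraic_notation_alt board_visual
instance (board_visual : String) (out : List (String × List String)) : Decidable (Spec_convert_to_algebraic_notation board_visual out) := by unfold Spec_convert_to_algebraic_notation; infer_instance

-- ===== CLAIM (what is proved, stated in full; the proofs are below) =====
def Claim_equal_convert_to_algebraic_notation : Prop := ∀ (board_visual : String), Dom_convert_to_algebraic_notation board_visual → Pre_convert_to_algebraic_notation board_visual → Spec_convert_to_algebraic_notation board_visual (convert_to_algebraic_notation board_visual)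

-- ===== LEMMAS AND PROOFS =====

-- simple recursive characterisation of split on a single-character separator
def pvSplit1 (p : Char) : List Char → List (List Char)
  | [] => [[]]
  | c :: cs =>
    if c = p then [] :: pvSplit1 p cs
    else match pvSplit1 p cs with
      | s :: rest => (c :: s) :: rest
      | [] => [[c]]

theorem pvSplit1_ne_nil (p : Char) (cs : List Char) : pvSplit1 p cs ≠ [] := by
  cases cs with
  | nil => simp [pvSplit1]
  | cons c cs =>
    simp only [pvSplit1]
    split
    · simp
    · split <;> simp_all

theorem pvSplitOn_go_single (p : Char) :
    ∀ (l : List Char) (fuel : Nat) (cur : List Char) (acc : List (List Char)),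
      l.length < fuel →
      PySem.Chars.splitOn.go [p] fuel l cur acc =
        acc.reverse ++ (match pvSplit1 p l with
          | s :: rest => (cur.reverse ++ s) :: rest
          | [] => [cur.reverse]) := by
  intro l
  induction l with
  | nil =>
    intro fuel cur acc h
    cases fuel with
    | zero => omega
    | succ f => simp [PySem.Chars.splitOn.go, pvSplit1]
  | cons c cs ih =>
    intro fuel cur acc h
    cases fuel with
    | zero => omega
    | succ f =>
      rw [PySem.Chars.splitOn.go]
      by_cases hc : c = p
      · subst hc
        have hpre : List.isPrefixOf [c] (c :: cs) = true := by
          simp [List.isPrefixOf]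
        simp only [hpre, if_pos]
        have hdrop : List.drop [c].length (c :: cs) = cs := rfl
        rw [hdrop]
        rw [ih f [] (cur.reverse :: acc) (by simpa using Nat.lt_of_succ_lt_succ h)]
        obtain ⟨s, rest, hs⟩ : ∃ s rest, pvSplit1 c cs = s :: rest := by
          cases hh : pvSplit1 c cs with
          | nil => exact absurd hh (pvSplit1_ne_nil c cs)
          | cons s rest => exact ⟨s, rest, rfl⟩
        simp [pvSplit1, hs]
      · have hpre : List.isPrefixOf [p] (c :: cs) = false := by
          simp [List.isPrefixOf]
          exact fun h' => absurd h'.symm hc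
        simp only [hpre, Bool.false_eq_true, if_false]
        rw [ih f (c :: cur) acc (by simpa using Nat.lt_of_succ_lt_succ h)]
        obtain ⟨s, rest, hs⟩ : ∃ s rest, pvSplit1 p cs = s :: rest := by
          cases hh : pvSplit1 p cs with
          | nil => exact absurd hh (pvSplit1_ne_nil p cs)
          | cons s rest => exact ⟨s, rest, rfl⟩
        simp [pvSplit1, hc, hs]

theorem pvSplitOn_eq_split1 (p : Char) (cs : List Char) :
    PySem.Chars.splitOn cs [p] = pvSplit1 p cs := by
  rw [PySem.Chars.splitOn, pvSplitOn_go_single p cs (cs.length + 1) [] [] (by omega)]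
  obtain ⟨s, rest, hs⟩ : ∃ s rest, pvSplit1 p cs = s :: rest := by
    cases hh : pvSplit1 p cs with
    | nil => exact absurd hh (pvSplit1_ne_nil p cs)
    | cons s rest => exact ⟨s, rest, rfl⟩
  simp [hs]

-- one character of A's scan equals one character of B's scan at cell number k
theorem pvAStep_eq_bChar (row : List Char) (k : Nat) (w b : List String) (ch : Char)
    (hch : ch ≠ '|') :
    pvAStep row (w, b, (k : Int)) ch =
      ((pvBChar row k (w, b) ch).1, (pvBChar row k (w, b) ch).2, (k : Int)) := by
  have harith : (97 + (k : Int) - 1).toNat = 96 + k := by omega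
  simp only [pvAStep, pvBChar, harith, hch, if_false]
  split
  · split <;> simp
  · simp

-- A's inner char loop with the cell counter equals B's fold over the indexed segments
theorem pvInner (row : List Char) :
    ∀ (cs : List Char) (k : Nat) (w b : List String),
      cs.foldl (pvAStep row) (w, b, (k : Int)) =
        ((((pvSplit1 '|' cs).zipIdx k).foldl (pvBSeg row) (w, b)).1,
         (((pvSplit1 '|' cs).zipIdx k).foldl (pvBSeg row) (w, b)).2,
         ((k + cs.count '|' : Nat) : Int)) := by
  intro cs
  induction cs with
  | nil =>
    intro k w b
    simp [pvSplit1, pvBSeg]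
  | cons c cs ih =>
    intro k w b
    by_cases hc : c = '|'
    · subst hc
      have halpha : PySem.Chars.isalpha '|' = false := by decide
      have h1 : pvAStep row (w, b, (k : Int)) '|' = (w, b, ((k + 1 : Nat) : Int)) := by
        simp [pvAStep, halpha]
      have hsplit : pvSplit1 '|' ('|' :: cs) = [] :: pvSplit1 '|' cs := by
        simp [pvSplit1]
      have hbseg : pvBSeg row (w, b) ([], k) = (w, b) := rfl
      rw [List.foldl_cons, h1, ih (k + 1) w b, hsplit, List.zipIdx_cons, List.foldl_cons, hbseg]
      simp
      all_goals omega
    · obtain ⟨s, rest, hs⟩ : ∃ s rest, pvSplit1 '|' cs = s :: rest := by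
        cases hh : pvSplit1 '|' cs with
        | nil => exact absurd hh (pvSplit1_ne_nil '|' cs)
        | cons s rest => exact ⟨s, rest, rfl⟩
      have hsplit : pvSplit1 '|' (c :: cs) = (c :: s) :: rest := by
        simp [pvSplit1, hc, hs]
      have hstep := pvAStep_eq_bChar row k w b c hc
      have hcount : ((c :: cs).count '|') = cs.count '|' := by
        simp [hc]
      rw [List.foldl_cons, hstep, ih k _ _, hsplit, hs, List.zipIdx_cons, hcount]
      simp [pvBSeg]

-- one row of A equals one row of B
theorem pvRowEq (row : List Char) (w b : List String) :
    (let st := row.foldl (pvAStep row) (w, b, (0 : Int)); (st.1, st.2.1)) =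
      ((PySem.Chars.splitOn row ['|']).zipIdx).foldl (pvBSeg row) (w, b) := by
  rw [pvSplitOn_eq_split1]
  have h := pvInner row row 0 w b
  have h0 : ((0 : Nat) : Int) = (0 : Int) := by norm_num
  rw [h0] at h
  simp only [h]

-- ===== VERDICT (by name: the statement is the Claim_ definition above) =====
theorem convert_to_algebraic_notation_spec : Claim_equal_convert_to_algebraic_notation := by
  intro board_visual _ _
  unfold Spec_convert_to_algebraic_notation
  unfold convert_to_algebraic_notation convert_to_algebraic_notation_alt
  have hstep : (fun (wb : List String × List String) (row : List Char) =>
      let st := row.foldl (pvAStep row) (wb.1, wb.2, (0 : Int))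
      (st.1, st.2.1)) =
      (fun (wb : List String × List String) (row : List Char) =>
        ((PySem.Chars.splitOn row ['|']).zipIdx).foldl (pvBSeg row) wb) := by
    funext wb row
    have := pvRowEq row wb.1 wb.2
    simpa using this
  simp only [hstep]
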